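-- pv_equiv track=rewrite | github.com/SperanzaTY/spx-helper | mcp-tools/scheduler-query/scheduler_mcp_server.py | _extract_task_code
-- ===== SOURCE A (Python) =====
-- def _extract_task_code(task_instance_code: str) -> str:
--     """从实例编码中提取任务编码。
--     例: 'twbi_spx_ops.studio_6786158_202604012010_MINUTE_1' -> 'twbi_spx_ops.studio_6786158'
--     """
--     parts = task_instance_code.split(".")
--     if len(parts) < 2:
--         return task_instance_code
--     project = parts[0]
--     rest = ".".join(parts[1:])
--     tokens = rest.split("_")
--     # studio_{数字} 后面的都是实例标识
--     for i, tok in enumerate(tokens):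
--         if i > 0 and tok.isdigit():
--             # 检查下一个 token 是否像时间戳（纯数字且 >= 8 位）
--             if i + 1 < len(tokens) and len(tokens[i + 1]) >= 8 and tokens[i + 1].isdigit():
--                 return f"{project}.{'_'.join(tokens[:i+1])}"
--     return task_instance_code
-- ===== SOURCE B (Python) =====
-- def _extract_task_code(task_instance_code: str) -> str:
--     """Extract the task code from an instance code — positional algorithm: instead of
--     splitting the rest into a token list and scanning tokens, collect the underscore
--     positions, test digit-ness of character ranges of the unsplit string (the timestamp
--     length check becomes pure index arithmetic), and return a prefix slice."""
--     parts = task_instance_code.split(".")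
--     if len(parts) < 2:
--         return task_instance_code
--     project = parts[0]
--     rest = ".".join(parts[1:])
--     ends = [j for j, ch in enumerate(rest) if ch == "_"] + [len(rest)]
--     for lo, mid, hi in zip(ends, ends[1:], ends[2:]):
--         if rest[lo + 1:mid].isdigit() and hi - mid >= 9 and rest[mid + 1:hi].isdigit():
--             return project + "." + rest[:mid]
--     return task_instance_code
-- ===== Notes on version B (the rewrite author's own statement) =====
-- stated objective: alternative
-- what changed: B never builds the token list: it collects the underscore positions of the rest string, scans consecutive position triples testing digit-ness of character ranges of the unsplit string (the timestamp length check becomes index arithmetic hi-mid>=9), and returns a prefix slice of rest instead of re-joining tokens.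
import Mathlib
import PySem

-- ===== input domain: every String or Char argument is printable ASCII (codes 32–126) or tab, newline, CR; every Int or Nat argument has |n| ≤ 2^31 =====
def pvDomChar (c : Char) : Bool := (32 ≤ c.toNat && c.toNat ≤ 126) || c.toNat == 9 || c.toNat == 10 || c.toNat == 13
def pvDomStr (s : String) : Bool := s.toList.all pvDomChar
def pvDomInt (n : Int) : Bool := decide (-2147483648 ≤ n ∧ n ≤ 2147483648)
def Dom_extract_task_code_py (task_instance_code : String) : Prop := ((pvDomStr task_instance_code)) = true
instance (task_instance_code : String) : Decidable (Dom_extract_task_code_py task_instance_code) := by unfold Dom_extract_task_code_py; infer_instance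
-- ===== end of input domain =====

-- B replaces A's token-list scan by a positional algorithm: it collects the underscore
-- positions of the rest string, scans position triples testing digit-ness of character
-- ranges of the unsplit string, and returns a prefix slice (objective: alternative).

-- ===== PORT A =====
-- the early-returning 'for i, tok in enumerate(tokens)' loop; none = fell through to the final return
def pvALoop (project : String) (tokens : List String) : List (Int × String) → Option String
  | [] => none
  | (i, tok) :: restEnum =>
    if 0 < i ∧ PySem.Str.strIsdigit tok = true then
      -- 'tokens[i+1]' is guarded by 'i + 1 < len(tokens)'; pyGetD is total so the guard order is preserved
      if i + 1 < (tokens.length : Int) ∧ 8 ≤ PySem.Str.len (PySem.List.pyGetD tokens (i + 1) "")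
           ∧ PySem.Str.strIsdigit (PySem.List.pyGetD tokens (i + 1) "") = true then
        some (project ++ "." ++ PySem.Str.join "_" (PySem.List.slice tokens none (some (i + 1))))
      else pvALoop project tokens restEnum
    else pvALoop project tokens restEnum

def extract_task_code_py (task_instance_code : String) : String :=
  let parts := (PySem.Str.split? task_instance_code ".").getD []   -- sep "." ≠ "": split? is never none
  if parts.length < 2 then task_instance_code
  else
    let project := PySem.List.pyGetD parts 0 ""                    -- parts[0]; in range since len ≥ 2
    let rest := PySem.Str.join "." (PySem.List.slice parts (some 1) none)
    let tokens := (PySem.Str.split? rest "_").getD []              -- sep "_" ≠ ""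
    match pvALoop project tokens (PySem.List.enumerate tokens) with
    | some r => r
    | none => task_instance_code

-- ===== PORT B =====
-- the 'for lo, mid, hi in zip(ends, ends[1:], ends[2:])' loop (zip3 ported as nested binary zips)
def pvBScan (project : String) (rest whole : String) : List ((Int × Int) × Int) → String
  | [] => whole
  | ((lo, mid), hi) :: more =>
    if PySem.Str.strIsdigit (PySem.Str.slice rest (some (lo + 1)) (some mid)) = true
         ∧ 9 ≤ hi - mid
         ∧ PySem.Str.strIsdigit (PySem.Str.slice rest (some (mid + 1)) (some hi)) = true then
      project ++ "." ++ PySem.Str.slice rest none (some mid)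
    else pvBScan project rest whole more

def extract_task_code_py_alt (task_instance_code : String) : String :=
  let parts := (PySem.Str.split? task_instance_code ".").getD []   -- sep "." ≠ "": split? is never none
  if parts.length < 2 then task_instance_code
  else
    let project := PySem.List.pyGetD parts 0 ""                    -- parts[0]; in range since len ≥ 2
    let rest := PySem.Str.join "." (PySem.List.slice parts (some 1) none)
    -- ends = [j for j, ch in enumerate(rest) if ch == "_"] + [len(rest)]
    let ends := ((PySem.List.enumerate rest.toList).filter (fun p => p.2 == '_')).map (fun p => p.1)
                  ++ [PySem.Str.len rest]
    pvBScan project rest task_instance_code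
      ((ends.zip (PySem.List.slice ends (some 1) none)).zip (PySem.List.slice ends (some 2) none))

-- ===== PRECONDITION & SPEC =====
def Spec_extract_task_code_py (task_instance_code : String) (out : String) : Prop := out = extract_task_code_py_alt task_instance_code
instance (task_instance_code : String) (out : String) : Decidable (Spec_extract_task_code_py task_instance_code out) := by unfold Spec_extract_task_code_py; infer_instance

-- ===== CLAIM (what is proved, stated in full; the proofs are below) =====
def Claim_equal_extract_task_code_py : Prop := ∀ (task_instance_code : String), Dom_extract_task_code_py task_instance_code → Spec_extract_task_code_py task_instance_code (extract_task_code_py task_instance_code)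

-- ===== LEMMAS AND PROOFS =====

-- rest.split("_") as a structural recursion: pySplitAux pre l = the pieces of pre ++ l,
-- pre being the (underscore-free) part of the current piece already read
def pySplitAux (pre : List Char) : List Char → List (List Char)
  | [] => [pre]
  | c :: rest => if c = '_' then pre :: pySplitAux [] rest else pySplitAux (pre ++ [c]) rest

lemma pv_split_nil (pre : List Char) : pySplitAux pre [] = [pre] := rfl

lemma pv_split_cons_us (pre rest : List Char) :
    pySplitAux pre ('_' :: rest) = pre :: pySplitAux [] rest := by simp [pySplitAux]

lemma pv_split_cons (pre : List Char) (c : Char) (rest : List Char) (hc : c ≠ '_') :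
    pySplitAux pre (c :: rest) = pySplitAux (pre ++ [c]) rest := by simp [pySplitAux, hc]

-- one-step reductions of the library splitter's fuelled worker (definitional)
lemma pv_go_zero (l cur : List Char) (accs : List (List Char)) :
    PySem.Chars.splitOn.go ['_'] 0 l cur accs = ((cur.reverse ++ l) :: accs).reverse := rfl

lemma pv_go_succ_nil (f : Nat) (cur : List Char) (accs : List (List Char)) :
    PySem.Chars.splitOn.go ['_'] (f + 1) [] cur accs = (cur.reverse :: accs).reverse := rfl

lemma pv_go_succ_cons (f : Nat) (c : Char) (rest cur : List Char) (accs : List (List Char)) :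
    PySem.Chars.splitOn.go ['_'] (f + 1) (c :: rest) cur accs =
      if ['_'].isPrefixOf (c :: rest) = true then
        PySem.Chars.splitOn.go ['_'] f (List.drop 1 (c :: rest)) [] (cur.reverse :: accs)
      else PySem.Chars.splitOn.go ['_'] f rest (c :: cur) accs := rfl

lemma pv_go_eq : ∀ (f : Nat) (l : List Char), l.length ≤ f → ∀ (cur : List Char) (accs : List (List Char)),
    PySem.Chars.splitOn.go ['_'] f l cur accs = accs.reverse ++ pySplitAux cur.reverse l := by
  intro f
  induction f with
  | zero =>
    intro l hl cur accs
    have hl0 : l = [] := List.eq_nil_of_length_eq_zero (by omega)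
    subst hl0
    rw [pv_go_zero, pv_split_nil]
    simp
  | succ f ih =>
    intro l hl cur accs
    cases l with
    | nil => rw [pv_go_succ_nil, pv_split_nil]; simp
    | cons c rest =>
      rw [pv_go_succ_cons]
      by_cases hc : c = '_'
      · subst hc
        rw [if_pos (by simp [List.isPrefixOf])]
        rw [show List.drop 1 ('_' :: rest) = rest from rfl]
        rw [ih rest (by simpa using hl) [] (cur.reverse :: accs)]
        rw [pv_split_cons_us]
        simp
      · rw [if_neg (by simp [List.isPrefixOf]; intro h; exact absurd h.symm hc)]
        rw [ih rest (by simpa using hl) (c :: cur) accs]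
        rw [pv_split_cons _ _ _ hc]
        simp

lemma pv_splitOn_eq (l : List Char) : PySem.Chars.splitOn l ['_'] = pySplitAux [] l := by
  unfold PySem.Chars.splitOn
  simpa using pv_go_eq (l.length + 1) l (by omega) [] []

lemma pv_splitAux_ne_nil : ∀ (l pre : List Char), pySplitAux pre l ≠ [] := by
  intro l
  induction l with
  | nil => intro pre; simp [pySplitAux]
  | cons c rest ih =>
    intro pre
    by_cases hc : c = '_' <;> simp [pySplitAux, hc, ih]

lemma pv_join_splitAux : ∀ (l pre : List Char), PySem.Chars.join ['_'] (pySplitAux pre l) = pre ++ l := by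
  intro l
  induction l with
  | nil => intro pre; simp [pv_split_nil, PySem.Chars.join_singleton]
  | cons c rest ih =>
    intro pre
    by_cases hc : c = '_'
    · subst hc
      obtain ⟨h, t, ht⟩ : ∃ h t, pySplitAux [] rest = h :: t := by
        cases he : pySplitAux [] rest with
        | nil => exact absurd he (pv_splitAux_ne_nil rest [])
        | cons h t => exact ⟨h, t, rfl⟩
      have hih := ih []
      rw [ht] at hih
      simp only [List.nil_append] at hih
      rw [pv_split_cons_us, ht, PySem.Chars.join_cons_cons, hih]
      simp
    · rw [pv_split_cons _ _ _ hc, ih (pre ++ [c])]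
      simp
lemma pv_splitAux_free : ∀ (l pre : List Char), '_' ∉ pre → ∀ t ∈ pySplitAux pre l, '_' ∉ t := by
  intro l
  induction l with
  | nil => intro pre hpre t ht; rw [pv_split_nil] at ht; simp at ht; subst ht; exact hpre
  | cons c rest ih =>
    intro pre hpre t ht
    by_cases hc : c = '_'
    · subst hc
      rw [pv_split_cons_us] at ht
      rcases List.mem_cons.mp ht with h | h
      · subst h; exact hpre
      · exact ih [] (by simp) t h
    · rw [pv_split_cons _ _ _ hc] at ht
      refine ih (pre ++ [c]) ?_ t ht
      simp only [List.mem_append, List.mem_singleton]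
      rintro (h | h)
      · exact hpre h
      · exact hc h.symm

-- positions of the underscores of '_'.join(toks) when no token contains '_'
def cutsFrom : Nat → List (List Char) → List Int
  | _, [] => []
  | _, [_] => []
  | c, t :: u :: vs => ((c + t.length : Nat) : Int) :: cutsFrom (c + t.length + 1) (u :: vs)

lemma pv_filter_enum_free (t : List Char) (c : Int) (h : '_' ∉ t) :
    (PySem.List.enumerate t c).filter (fun p => p.2 == '_') = [] := by
  apply List.filter_eq_nil_iff.mpr
  intro p hp
  have hmem : p.2 ∈ t := by
    have hm := PySem.List.map_snd_enumerate t c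
    rw [← hm]
    exact List.mem_map_of_mem hp
  simp only [beq_iff_eq]
  intro he
  exact h (he ▸ hmem)

lemma pv_cuts : ∀ (toks : List (List Char)) (c : Nat), (∀ t ∈ toks, '_' ∉ t) →
    ((PySem.List.enumerate (PySem.Chars.join ['_'] toks) (c : Int)).filter
        (fun p => p.2 == '_')).map (fun p => p.1) = cutsFrom c toks := by
  intro toks
  induction toks with
  | nil => intro c _; simp [PySem.Chars.join_nil, PySem.List.enumerate_nil, cutsFrom]
  | cons t ts ih =>
    intro c hfree
    cases ts with
    | nil =>
      rw [PySem.Chars.join_singleton, pv_filter_enum_free t _ (hfree t (by simp))]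
      simp [cutsFrom]
    | cons u vs =>
      rw [PySem.Chars.join_cons_cons, List.append_assoc,
        show ['_'] ++ PySem.Chars.join ['_'] (u :: vs) = '_' :: PySem.Chars.join ['_'] (u :: vs) from rfl]
      rw [PySem.List.enumerate_append, PySem.List.enumerate_cons,
        List.filter_append, List.map_append, pv_filter_enum_free t _ (hfree t (by simp))]
      have h2 := ih (c + t.length + 1) (fun x hx => hfree x (by simp [hx]))
      have e2 : ((c : Int) + ↑t.length) + 1 = ((c + t.length + 1 : Nat) : Int) := by push_cast; ring
      rw [show (List.filter (fun p => p.2 == '_')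
            (((c : Int) + ↑t.length, '_') :: PySem.List.enumerate (PySem.Chars.join ['_'] (u :: vs)) (↑c + ↑t.length + 1)))
          = ((c : Int) + ↑t.length, '_') :: List.filter (fun p => p.2 == '_')
              (PySem.List.enumerate (PySem.Chars.join ['_'] (u :: vs)) (↑c + ↑t.length + 1)) from by
        rw [List.filter_cons]; simp]
      rw [List.map_cons, e2, h2]
      show [] ++ ((c : Int) + ↑t.length) :: cutsFrom (c + t.length + 1) (u :: vs) = cutsFrom c (t :: u :: vs)
      rw [show cutsFrom c (t :: u :: vs)
            = ((c + t.length : Nat) : Int) :: cutsFrom (c + t.length + 1) (u :: vs) from rfl]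
      rw [List.nil_append]
      norm_cast

-- zip(ends, ends[1:], ends[2:]) as a structural recursion
def zipTriples : List Int → List ((Int × Int) × Int)
  | a :: b :: c :: r => ((a, b), c) :: zipTriples (b :: c :: r)
  | _ => []

lemma pv_zipTriples_cons (a b c : Int) (r : List Int) :
    zipTriples (a :: b :: c :: r) = ((a, b), c) :: zipTriples (b :: c :: r) := rfl

lemma pv_zip_drop : ∀ (l : List Int), (l.zip (l.drop 1)).zip (l.drop 2) = zipTriples l := by
  intro l
  induction l with
  | nil => rfl
  | cons a t ih =>
    cases t with
    | nil => rfl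
    | cons b t2 =>
      cases t2 with
      | nil => rfl
      | cons c r =>
        show (((a, b) :: (b :: c :: r).zip (c :: r)).zip (c :: r)) = _
        show ((a, b), c) :: ((b :: c :: r).zip (c :: r)).zip r = zipTriples (a :: b :: c :: r)
        rw [pv_zipTriples_cons]
        exact congrArg (List.cons ((a, b), c)) (by simpa using ih)

lemma pv_zip_eq (l : List Int) :
    (l.zip (PySem.List.slice l (some 1) none)).zip (PySem.List.slice l (some 2) none) = zipTriples l := by
  rw [PySem.List.slice_from l (by omega : (0:Int) ≤ 1), PySem.List.slice_from l (by omega : (0:Int) ≤ 2)]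
  simpa using pv_zip_drop l

-- '_'.join(ys + [y]) = '_'.join(ys) ++ '_' :: y for nonempty ys
lemma pv_chars_join_append (ps : List (List Char)) (p : List Char) (h : ps ≠ []) :
    PySem.Chars.join ['_'] (ps ++ [p]) = PySem.Chars.join ['_'] ps ++ '_' :: p := by
  induction ps with
  | nil => exact absurd rfl h
  | cons a t ih =>
    cases t with
    | nil => simp [PySem.Chars.join_cons_cons, PySem.Chars.join_singleton]
    | cons b u =>
      have h2 := ih (by simp)
      rw [show (a :: b :: u) ++ [p] = a :: ((b :: u) ++ [p]) from by simp]
      rw [show (b :: u) ++ [p] = b :: (u ++ [p]) from by simp] at h2 ⊢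
      rw [PySem.Chars.join_cons_cons, h2, PySem.Chars.join_cons_cons]
      simp

lemma pv_take_join (v : List Char) (ws : List (List Char)) :
    List.take v.length (PySem.Chars.join ['_'] (v :: ws)) = v := by
  cases ws with
  | nil => rw [PySem.Chars.join_singleton, List.take_length]
  | cons w ws' =>
    rw [PySem.Chars.join_cons_cons, List.append_assoc]
    exact List.take_left ..

-- drop just past an explicit prefix
lemma pv_drop_past (J X : List Char) :
    List.drop (J.length + 1) (J ++ '_' :: X) = X := by
  rw [show J ++ '_' :: X = (J ++ ['_']) ++ X from by simp, List.drop_append]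
  simp

lemma pv_take_upto (J X Y : List Char) :
    List.take (J.length + 1 + X.length) ((J ++ '_' :: X) ++ Y) = J ++ '_' :: X := by
  have h : (J ++ '_' :: X).length = J.length + 1 + X.length := by
    simp [List.length_append]; omega
  rw [← h]
  exact List.take_left ..

-- one-step reduction of A's loop (definitional)
lemma pv_aloop_cons (project : String) (tokens : List String) (i : Int) (tok : String)
    (r : List (Int × String)) :
    pvALoop project tokens ((i, tok) :: r) =
      if 0 < i ∧ PySem.Str.strIsdigit tok = true then
        if i + 1 < (tokens.length : Int) ∧ 8 ≤ PySem.Str.len (PySem.List.pyGetD tokens (i + 1) "")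
             ∧ PySem.Str.strIsdigit (PySem.List.pyGetD tokens (i + 1) "") = true then
          some (project ++ "." ++ PySem.Str.join "_" (PySem.List.slice tokens none (some (i + 1))))
        else pvALoop project tokens r
      else pvALoop project tokens r := rfl

-- one-step reduction of B's loop (definitional)
lemma pv_bscan_cons (project rest whole : String) (lo mid hi : Int) (more : List ((Int × Int) × Int)) :
    pvBScan project rest whole (((lo, mid), hi) :: more) =
      if PySem.Str.strIsdigit (PySem.Str.slice rest (some (lo + 1)) (some mid)) = true
           ∧ 9 ≤ hi - mid
           ∧ PySem.Str.strIsdigit (PySem.Str.slice rest (some (mid + 1)) (some hi)) = true then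
        project ++ "." ++ PySem.Str.slice rest none (some mid)
      else pvBScan project rest whole more := rfl

-- the two loops agree: A scanning the remaining tokens (u :: vs) at token index k,
-- B scanning the corresponding triples of underscore positions
lemma pv_align (project whole rest : String) (toks : List (List Char)) :
    ∀ (vs : List (List Char)) (u : List Char) (done : List (List Char)) (k : Nat) (J : List Char),
      toks = done ++ u :: vs → done.length = k → 1 ≤ k → J = PySem.Chars.join ['_'] done →
      rest.toList = J ++ '_' :: PySem.Chars.join ['_'] (u :: vs) →
      (match pvALoop project (toks.map String.ofList)
          (PySem.List.enumerate ((u :: vs).map String.ofList) (k : Int)) with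
        | some r => r
        | none => whole)
      = pvBScan project rest whole
          (zipTriples ((J.length : Int) :: cutsFrom (J.length + 1) (u :: vs) ++ [(rest.toList.length : Int)])) := by
  intro vs
  induction vs with
  | nil =>
    intro u done k J hdone hk hk1 hJ hrest
    rw [show cutsFrom (J.length + 1) [u] = [] from rfl]
    rw [show zipTriples ((J.length : Int) :: [] ++ [(rest.toList.length : Int)]) = [] from rfl]
    rw [List.map_cons, List.map_nil, PySem.List.enumerate_cons, pv_aloop_cons]
    have hlen : ((toks.map String.ofList).length : Int) = (k : Int) + 1 := by
      rw [List.length_map, hdone]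
      simp [← hk]
    have hb : ¬((k : Int) + 1 < ((toks.map String.ofList).length : Int)
        ∧ 8 ≤ PySem.Str.len (PySem.List.pyGetD (toks.map String.ofList) ((k : Int) + 1) "")
        ∧ PySem.Str.strIsdigit (PySem.List.pyGetD (toks.map String.ofList) ((k : Int) + 1) "") = true) := by
      intro hcond
      rw [hlen] at hcond
      exact absurd hcond.1 (by omega)
    by_cases houter : (0 < (k : Int) ∧ PySem.Str.strIsdigit (String.ofList u) = true)
    · rw [if_pos houter, if_neg hb, PySem.List.enumerate_nil]
      rfl
    · rw [if_neg houter, PySem.List.enumerate_nil]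
      rfl
  | cons v ws ih =>
    intro u done k J hdone hk hk1 hJ hrest
    have hdne : done ≠ [] := by
      intro hnil; rw [hnil] at hk; simp at hk; omega
    have hrest2 : rest.toList = (J ++ '_' :: u) ++ '_' :: PySem.Chars.join ['_'] (v :: ws) := by
      rw [hrest, PySem.Chars.join_cons_cons]
      simp
    -- the head of the remaining ends list is the cut (or string end) after v
    obtain ⟨T, hT⟩ : ∃ T, cutsFrom (J.length + 1 + u.length + 1) (v :: ws) ++ [(rest.toList.length : Int)]
        = ((J.length + 1 + u.length + 1 + v.length : Nat) : Int) :: T := by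
      cases ws with
      | nil =>
        refine ⟨[], ?_⟩
        rw [show cutsFrom (J.length + 1 + u.length + 1) [v] = [] from rfl]
        have hL : rest.toList.length = J.length + 1 + u.length + 1 + v.length := by
          rw [hrest2, PySem.Chars.join_singleton]
          simp [List.length_append]; omega
        rw [hL]
        rfl
      | cons w ws' =>
        exact ⟨_, rfl⟩
    have hcf : cutsFrom (J.length + 1) (u :: v :: ws)
        = ((J.length + 1 + u.length : Nat) : Int) :: cutsFrom (J.length + 1 + u.length + 1) (v :: ws) := rfl
    rw [hcf, show (((J.length : Nat) : Int) :: (((J.length + 1 + u.length : Nat) : Int) :: cutsFrom (J.length + 1 + u.length + 1) (v :: ws)) ++ [(rest.toList.length : Int)])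
        = ((J.length : Nat) : Int) :: ((J.length + 1 + u.length : Nat) : Int) :: (cutsFrom (J.length + 1 + u.length + 1) (v :: ws) ++ [(rest.toList.length : Int)]) from rfl, hT,
      pv_zipTriples_cons]
    -- B-side conditions of the first triple
    have hc1 : PySem.Str.strIsdigit (PySem.Str.slice rest (some ((J.length : Int) + 1))
        (some ((J.length + 1 + u.length : Nat) : Int))) = PySem.Chars.strIsdigit u := by
      rw [PySem.Str.strIsdigit_eq, PySem.Str.toList_slice, PySem.Chars.slice_eq_listSlice]
      rw [show ((J.length : Int) + 1) = ((J.length + 1 : Nat) : Int) from by push_cast; ring]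
      rw [show ((J.length + 1 + u.length : Nat) : Int) = ((J.length + 1 : Nat) : Int) + (u.length : Int) from by push_cast; ring]
      rw [PySem.List.slice_natCast_add, hrest, pv_drop_past, pv_take_join]
    have hc3 : PySem.Str.strIsdigit (PySem.Str.slice rest (some (((J.length + 1 + u.length : Nat) : Int) + 1))
        (some ((J.length + 1 + u.length + 1 + v.length : Nat) : Int))) = PySem.Chars.strIsdigit v := by
      rw [PySem.Str.strIsdigit_eq, PySem.Str.toList_slice, PySem.Chars.slice_eq_listSlice]
      rw [show (((J.length + 1 + u.length : Nat) : Int) + 1) = ((J.length + 1 + u.length + 1 : Nat) : Int) from by push_cast; ring]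
      rw [show ((J.length + 1 + u.length + 1 + v.length : Nat) : Int)
            = ((J.length + 1 + u.length + 1 : Nat) : Int) + (v.length : Int) from by push_cast; ring]
      rw [PySem.List.slice_natCast_add, hrest2]
      rw [show (J.length + 1 + u.length + 1) = (J ++ '_' :: u).length + 1 from by
        simp [List.length_append]; omega]
      rw [pv_drop_past, pv_take_join]
    -- A-side: the token after u is v
    have hgetv : PySem.List.pyGetD (toks.map String.ofList) ((k : Int) + 1) "" = String.ofList v := by
      rw [show ((k : Int) + 1) = ((k + 1 : Nat) : Int) from by push_cast; ring, PySem.List.pyGetD_natCast]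
      rw [List.getD_eq_getElem?_getD, List.getElem?_map, hdone]
      rw [List.getElem?_append_right (by rw [hk]; omega)]
      rw [hk]
      simp
    have hklt : (k : Int) + 1 < ((toks.map String.ofList).length : Int) := by
      rw [List.length_map, hdone, List.length_append, hk]
      push_cast [List.length_cons]
      omega
    -- the recursive stage (used when the first candidate fails)
    have hrec : (match pvALoop project (toks.map String.ofList)
          (PySem.List.enumerate ((v :: ws).map String.ofList) ((k : Int) + 1)) with
        | some r => r
        | none => whole)
        = pvBScan project rest whole
            (zipTriples (((J.length + 1 + u.length : Nat) : Int) :: ((J.length + 1 + u.length + 1 + v.length : Nat) : Int) :: T)) := by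
      have hih := ih v (done ++ [u]) (k + 1) (J ++ '_' :: u)
        (by rw [hdone]; simp)
        (by simp [hk])
        (by omega)
        (by rw [hJ, pv_chars_join_append done u hdne])
        hrest2
      rw [show ((k + 1 : Nat) : Int) = (k : Int) + 1 from by push_cast; ring] at hih
      rw [show ((J ++ '_' :: u).length : Int) = ((J.length + 1 + u.length : Nat) : Int) from by
        simp [List.length_append]; omega] at hih
      rw [show (J ++ '_' :: u).length + 1 = J.length + 1 + u.length + 1 from by
        simp [List.length_append]; omega] at hih
      rw [List.cons_append, hT] at hih
      exact hih
    -- now peel one A step and one B step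
    rw [List.map_cons, PySem.List.enumerate_cons, pv_aloop_cons]
    by_cases hu : PySem.Chars.strIsdigit u = true
    · have houter : 0 < (k : Int) ∧ PySem.Str.strIsdigit (String.ofList u) = true := by
        refine ⟨by exact_mod_cast hk1, ?_⟩
        rw [PySem.Str.strIsdigit_eq, String.toList_ofList]
        exact hu
      rw [if_pos houter]
      by_cases hv : 8 ≤ v.length ∧ PySem.Chars.strIsdigit v = true
      · have hinner : (k : Int) + 1 < ((toks.map String.ofList).length : Int)
            ∧ 8 ≤ PySem.Str.len (PySem.List.pyGetD (toks.map String.ofList) ((k : Int) + 1) "")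
            ∧ PySem.Str.strIsdigit (PySem.List.pyGetD (toks.map String.ofList) ((k : Int) + 1) "") = true := by
          refine ⟨hklt, ?_, ?_⟩
          · rw [hgetv, PySem.Str.len_eq, String.toList_ofList]
            exact_mod_cast hv.1
          · rw [hgetv, PySem.Str.strIsdigit_eq, String.toList_ofList]
            exact hv.2
        rw [if_pos hinner]
        have hBcond : PySem.Str.strIsdigit (PySem.Str.slice rest (some (((J.length : Nat) : Int) + 1))
              (some ((J.length + 1 + u.length : Nat) : Int))) = true
            ∧ 9 ≤ ((J.length + 1 + u.length + 1 + v.length : Nat) : Int) - ((J.length + 1 + u.length : Nat) : Int)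
            ∧ PySem.Str.strIsdigit (PySem.Str.slice rest (some (((J.length + 1 + u.length : Nat) : Int) + 1))
              (some ((J.length + 1 + u.length + 1 + v.length : Nat) : Int))) = true := by
          refine ⟨by rw [hc1]; exact hu, by push_cast; omega, by rw [hc3]; exact hv.2⟩
        show (project ++ "." ++ PySem.Str.join "_" (PySem.List.slice (toks.map String.ofList) none (some ((k : Int) + 1))))
            = pvBScan project rest whole _
        rw [pv_bscan_cons]
        rw [if_pos hBcond]
        congr 1
        -- '_'.join(tokens[:k+1]) = rest[:mid]
        apply String.toList_inj.mp
        rw [PySem.Str.toList_join, PySem.Str.toList_slice, PySem.Chars.slice_eq_listSlice,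
          PySem.List.slice_to_natCast]
        rw [show ((k : Int) + 1) = ((k + 1 : Nat) : Int) from by push_cast; ring,
          PySem.List.slice_to _ (by omega), Int.toNat_natCast]
        rw [hdone, List.map_append, List.take_append]
        rw [show List.take (k + 1) (done.map String.ofList) = done.map String.ofList from by
          apply List.take_of_length_le; simp [hk]]
        rw [show (k + 1) - (done.map String.ofList).length = 1 from by simp [hk]]
        rw [show List.take 1 ((u :: v :: ws).map String.ofList) = [String.ofList u] from rfl]
        rw [show (done.map String.ofList ++ [String.ofList u]).map String.toList = done ++ [u] from by
          simp [List.map_map, Function.comp_def]]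
        rw [show ("_" : String).toList = ['_'] from rfl]
        rw [pv_chars_join_append done u hdne, ← hJ]
        rw [hrest2, pv_take_upto]
      · have hinner : ¬((k : Int) + 1 < ((toks.map String.ofList).length : Int)
            ∧ 8 ≤ PySem.Str.len (PySem.List.pyGetD (toks.map String.ofList) ((k : Int) + 1) "")
            ∧ PySem.Str.strIsdigit (PySem.List.pyGetD (toks.map String.ofList) ((k : Int) + 1) "") = true) := by
          intro hcond
          apply hv
          obtain ⟨-, h8, hd⟩ := hcond
          rw [hgetv, PySem.Str.len_eq, String.toList_ofList] at h8
          rw [hgetv, PySem.Str.strIsdigit_eq, String.toList_ofList] at hd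
          exact ⟨by exact_mod_cast h8, hd⟩
        rw [if_neg hinner]
        have hBcond : ¬(PySem.Str.strIsdigit (PySem.Str.slice rest (some (((J.length : Nat) : Int) + 1))
              (some ((J.length + 1 + u.length : Nat) : Int))) = true
            ∧ 9 ≤ ((J.length + 1 + u.length + 1 + v.length : Nat) : Int) - ((J.length + 1 + u.length : Nat) : Int)
            ∧ PySem.Str.strIsdigit (PySem.Str.slice rest (some (((J.length + 1 + u.length : Nat) : Int) + 1))
              (some ((J.length + 1 + u.length + 1 + v.length : Nat) : Int))) = true) := by
          intro hcond
          apply hv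
          obtain ⟨-, h9, hd⟩ := hcond
          rw [hc3] at hd
          refine ⟨?_, hd⟩
          push_cast at h9
          omega
        rw [pv_bscan_cons]
        rw [if_neg hBcond]
        exact hrec
    · have houter : ¬(0 < (k : Int) ∧ PySem.Str.strIsdigit (String.ofList u) = true) := by
        intro hcond
        apply hu
        have := hcond.2
        rw [PySem.Str.strIsdigit_eq, String.toList_ofList] at this
        exact this
      rw [if_neg houter]
      have hBcond : ¬(PySem.Str.strIsdigit (PySem.Str.slice rest (some (((J.length : Nat) : Int) + 1))
            (some ((J.length + 1 + u.length : Nat) : Int))) = true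
          ∧ 9 ≤ ((J.length + 1 + u.length + 1 + v.length : Nat) : Int) - ((J.length + 1 + u.length : Nat) : Int)
          ∧ PySem.Str.strIsdigit (PySem.Str.slice rest (some (((J.length + 1 + u.length : Nat) : Int) + 1))
            (some ((J.length + 1 + u.length + 1 + v.length : Nat) : Int))) = true) := by
        intro hcond
        apply hu
        rw [← hc1]
        exact hcond.1
      rw [pv_bscan_cons]
      rw [if_neg hBcond]
      exact hrec

-- ===== VERDICT (by name: the statement is the Claim_ definition above) =====
theorem extract_task_code_py_spec : Claim_equal_extract_task_code_py := by
  intro s _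
  unfold Spec_extract_task_code_py extract_task_code_py extract_task_code_py_alt
  simp only []
  by_cases hlen : ((PySem.Str.split? s ".").getD []).length < 2
  · rw [if_pos hlen, if_pos hlen]
  · rw [if_neg hlen, if_neg hlen]
    generalize (PySem.List.pyGetD ((PySem.Str.split? s ".").getD []) 0 "" : String) = project
    generalize (PySem.Str.join "." (PySem.List.slice ((PySem.Str.split? s ".").getD []) (some 1) none) : String) = rest
    have hsplit : (PySem.Str.split? rest "_").getD [] = (pySplitAux [] rest.toList).map String.ofList := by
      rw [← pv_splitOn_eq]
      simp [PySem.Str.split?, PySem.Chars.split?]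
    rw [hsplit]
    have hfree := pv_splitAux_free rest.toList [] (by simp)
    have hjoin := pv_join_splitAux rest.toList []
    simp only [List.nil_append] at hjoin
    have hcuts := pv_cuts (pySplitAux [] rest.toList) 0 hfree
    rw [hjoin] at hcuts
    rw [show ((0 : Nat) : Int) = (0 : Int) from rfl] at hcuts
    rw [hcuts, PySem.Str.len_eq, pv_zip_eq]
    rcases htoks : pySplitAux [] rest.toList with _ | ⟨t0, ts⟩
    · exact absurd htoks (pv_splitAux_ne_nil rest.toList [])
    · rw [htoks] at hjoin hfree
      cases ts with
      | nil =>
        rw [show cutsFrom 0 [t0] = [] from rfl]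
        rw [show zipTriples ([] ++ [((rest.toList.length : Nat) : Int)]) = [] from rfl]
        rfl
      | cons u vs =>
        rw [show cutsFrom 0 (t0 :: u :: vs) = ((0 + t0.length : Nat) : Int) :: cutsFrom (0 + t0.length + 1) (u :: vs) from rfl]
        simp only [Nat.zero_add]
        rw [List.map_cons, PySem.List.enumerate_cons, pv_aloop_cons,
          if_neg (by rintro ⟨h0, -⟩; exact absurd h0 (by omega))]
        have halign := pv_align project s rest (t0 :: u :: vs) vs u [t0] 1 t0
          rfl rfl (le_refl 1) (PySem.Chars.join_singleton ['_'] t0).symm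
          (by rw [← hjoin, PySem.Chars.join_cons_cons]; simp)
        rw [show ((1 : Nat) : Int) = (0 : Int) + 1 from by norm_num] at halign
        rw [show (t0.length : Int) = ((t0.length : Nat) : Int) from rfl] at halign
        exact halign
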